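-- pv_equiv track=rewrite | github.com/sgbett/runar | compilers/python/runar_compiler/frontend/typecheck.py | is_subtype
-- ===== SOURCE A (Python) =====
-- _BYTESTRING_SUBTYPES: frozenset[str] = frozenset({
--     "ByteString",
--     "PubKey",
--     "Sig",
--     "Sha256",
--     "Ripemd160",
--     "Addr",
--     "SigHashPreimage",
--     "Point",
-- })
--
-- _BIGINT_SUBTYPES: frozenset[str] = frozenset({
--     "bigint",
--     "RabinSig",
--     "RabinPubKey",
-- })
--
-- def is_subtype(actual: str, expected: str) -> bool:
--     """Return True if *actual* is a subtype of *expected*."""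
--     if actual == expected:
--         return True
--     # <inferred> and <unknown> are compatible with anything
--     if actual in ("<inferred>", "<unknown>"):
--         return True
--     if expected in ("<inferred>", "<unknown>"):
--         return True
--     if expected == "ByteString" and actual in _BYTESTRING_SUBTYPES:
--         return True
--     if expected == "bigint" and actual in _BIGINT_SUBTYPES:
--         return True
--     if expected.endswith("[]") and actual.endswith("[]"):
--         return is_subtype(actual[:-2], expected[:-2])
--     return False
-- ===== SOURCE B (Python) =====
-- _BYTESTRING_SUBTYPES = frozenset({
--     "ByteString", "PubKey", "Sig", "Sha256", "Ripemd160",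
--     "Addr", "SigHashPreimage", "Point",
-- })
--
-- _BIGINT_SUBTYPES = frozenset({"bigint", "RabinSig", "RabinPubKey"})
--
--
-- def _strip(s):
--     """Split off the trailing array brackets: return (core, depth)."""
--     d = 0
--     while s.endswith("[]"):
--         s = s[:-2]
--         d += 1
--     return s, d
--
--
-- def is_subtype(actual: str, expected: str) -> bool:
--     """Return True if *actual* is a subtype of *expected*."""
--     ca, da = _strip(actual)
--     ce, de = _strip(expected)
--     if ca == ce and da == de:
--         return True
--     if da <= de and ca in ("<inferred>", "<unknown>"):
--         return True
--     if de <= da and ce in ("<inferred>", "<unknown>"):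
--         return True
--     if da == de and ce == "ByteString" and ca in _BYTESTRING_SUBTYPES:
--         return True
--     if da == de and ce == "bigint" and ca in _BIGINT_SUBTYPES:
--         return True
--     return False
-- ===== Notes on version B (the rewrite author's own statement) =====
-- stated objective: simpler
-- what changed: A re-runs the whole special-case cascade recursively at every array-nesting level; B strips all trailing "[]" pairs from each string in one pass and decides with a single comparison of the two cores and their bracket depths.
import Mathlib
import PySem

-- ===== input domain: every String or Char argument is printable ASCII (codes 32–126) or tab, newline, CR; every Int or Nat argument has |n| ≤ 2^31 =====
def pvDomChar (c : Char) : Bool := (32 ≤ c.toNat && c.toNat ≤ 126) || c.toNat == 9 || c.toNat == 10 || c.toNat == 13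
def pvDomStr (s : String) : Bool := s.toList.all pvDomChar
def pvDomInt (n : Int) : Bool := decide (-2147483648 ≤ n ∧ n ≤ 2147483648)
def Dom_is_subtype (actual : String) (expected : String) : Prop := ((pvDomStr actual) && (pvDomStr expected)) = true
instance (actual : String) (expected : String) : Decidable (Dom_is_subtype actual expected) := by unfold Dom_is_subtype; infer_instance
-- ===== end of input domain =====

-- B replaces A's per-level re-checking recursion by a single depth analysis: strip all trailing
-- "[]" pairs from each string once, then decide by comparing the cores and bracket depths
-- (objective: simpler — one pass over each string, no recursive cascade).

-- ===== PORT A =====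
def pvBr : List Char := ['[', ']']
def pvInferred : List Char := "<inferred>".toList
def pvUnknown : List Char := "<unknown>".toList
def pvByteString : List Char := "ByteString".toList
def pvBigint : List Char := "bigint".toList

def pvSpecial (s : List Char) : Bool :=
  s == pvInferred || s == pvUnknown

def pvBS : List (List Char) :=
  ["ByteString".toList, "PubKey".toList, "Sig".toList, "Sha256".toList,
   "Ripemd160".toList, "Addr".toList, "SigHashPreimage".toList, "Point".toList]

def pvBI : List (List Char) :=
  ["bigint".toList, "RabinSig".toList, "RabinPubKey".toList]

-- used by the ports' termination proofs
theorem pv_slice2_len_lt (s : List Char) (h : PySem.Chars.endswith s pvBr = true) :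
    (PySem.List.slice s none (some (-2))).length < s.length := by
  have hs := (PySem.Chars.endswith_iff s pvBr).mp h
  have h2 : 2 <= s.length := by
    have := hs.length_le
    simpa [pvBr] using this
  rw [PySem.List.slice_to_neg_ofNat s 2 (by omega)]
  simp [List.length_take]
  omega

-- literal transliteration of A's recursive check cascade (on the code-point lists)
def isSubA (a e : List Char) : Bool :=
  if a == e then true
  else if pvSpecial a then true
  else if pvSpecial e then true
  else if e == pvByteString && pvBS.contains a then true
  else if e == pvBigint && pvBI.contains a then true
  else if h : (PySem.Chars.endswith e pvBr && PySem.Chars.endswith a pvBr) = true then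
    isSubA (PySem.List.slice a none (some (-2))) (PySem.List.slice e none (some (-2)))
  else false
termination_by a.length
decreasing_by
  exact pv_slice2_len_lt a (by simpa using (Bool.and_eq_true_iff.mp h).2)

def is_subtype (actual : String) (expected : String) : Bool :=
  isSubA actual.toList expected.toList

-- ===== PORT B =====
-- _strip: peel all trailing "[]" pairs, returning (core, depth)
def stripB (s : List Char) : List Char × Nat :=
  if h : PySem.Chars.endswith s pvBr = true then
    let p := stripB (PySem.List.slice s none (some (-2)))
    (p.1, p.2 + 1)
  else (s, 0)
termination_by s.length
decreasing_by
  exact pv_slice2_len_lt s h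

def isSubB (a e : List Char) : Bool :=
  let ca := (stripB a).1
  let da := (stripB a).2
  let ce := (stripB e).1
  let de := (stripB e).2
  (ca == ce && da == de) ||
  (decide (da ≤ de) && pvSpecial ca) ||
  (decide (de ≤ da) && pvSpecial ce) ||
  (da == de && ce == pvByteString && pvBS.contains ca) ||
  (da == de && ce == pvBigint && pvBI.contains ca)

def is_subtype_alt (actual : String) (expected : String) : Bool :=
  isSubB actual.toList expected.toList

-- ===== PRECONDITION & SPEC =====
def Spec_is_subtype (actual : String) (expected : String) (out : Bool) : Prop := out = is_subtype_alt actual expected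
instance (actual : String) (expected : String) (out : Bool) : Decidable (Spec_is_subtype actual expected out) := by unfold Spec_is_subtype; infer_instance

-- ===== CLAIM (what is proved, stated in full; the proofs are below) =====
def Claim_equal_is_subtype : Prop := ∀ (actual : String) (expected : String), Dom_is_subtype actual expected → Spec_is_subtype actual expected (is_subtype actual expected)

-- ===== LEMMAS AND PROOFS =====
theorem pv_slice2_spec (s : List Char) (h : PySem.Chars.endswith s pvBr = true) :
    PySem.List.slice s none (some (-2)) ++ pvBr = s := by
  obtain ⟨p, hp⟩ := (PySem.Chars.endswith_iff s pvBr).mp h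
  rw [PySem.List.slice_to_neg_ofNat s 2 (by omega)]
  subst hp
  simp [pvBr]

theorem pv_ends_append (a : List Char) :
    PySem.Chars.endswith (a ++ pvBr) pvBr = true :=
  (PySem.Chars.endswith_iff _ _).mpr ⟨a, rfl⟩

theorem pv_slice2_append (a : List Char) :
    PySem.List.slice (a ++ pvBr) none (some (-2)) = a := by
  rw [PySem.List.slice_to_neg_ofNat _ 2 (by omega)]
  simp [pvBr]

theorem pv_stripB_append (a : List Char) :
    stripB (a ++ pvBr) = ((stripB a).1, (stripB a).2 + 1) := by
  rw [stripB]
  simp [pv_ends_append, pv_slice2_append]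

theorem pv_stripB_not_ends (s : List Char) (h : PySem.Chars.endswith s pvBr = false) :
    stripB s = (s, 0) := by
  rw [stripB]; simp [h]

theorem pv_stripB_pos (s : List Char) (h : PySem.Chars.endswith s pvBr = true) :
    1 ≤ (stripB s).2 := by
  rw [stripB]; simp [h]

theorem pv_special_not_ends (s : List Char) (h : PySem.Chars.endswith s pvBr = true) :
    pvSpecial s = false := by
  cases hb : pvSpecial s with
  | false => rfl
  | true =>
    exfalso
    have : s = pvInferred ∨ s = pvUnknown := by
      simpa [pvSpecial] using hb
    rcases this with h1 | h1 <;> (subst h1; revert h; decide)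

theorem pv_bs_not_mem (s : List Char) (h : PySem.Chars.endswith s pvBr = true) :
    ¬ s ∈ pvBS := by
  intro hm
  have : ∀ x ∈ pvBS, PySem.Chars.endswith x pvBr = false := by decide
  rw [this s hm] at h; exact absurd h (by simp)

theorem pv_bi_not_mem (s : List Char) (h : PySem.Chars.endswith s pvBr = true) :
    ¬ s ∈ pvBI := by
  intro hm
  have : ∀ x ∈ pvBI, PySem.Chars.endswith x pvBr = false := by decide
  rw [this s hm] at h; exact absurd h (by simp)

theorem pv_bslit_ne (s : List Char) (h : PySem.Chars.endswith s pvBr = true) :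
    ¬ s = pvByteString := by
  intro hb; subst hb; revert h; decide

theorem pv_bilit_ne (s : List Char) (h : PySem.Chars.endswith s pvBr = true) :
    ¬ s = pvBigint := by
  intro hb; subst hb; revert h; decide

theorem pv_ne_of_ends_left (a e : List Char) (ha : PySem.Chars.endswith a pvBr = true)
    (he : PySem.Chars.endswith e pvBr = false) : ¬ a = e := by
  intro hb; subst hb; rw [ha] at he; exact absurd he (by simp)

-- joint strip of one "[]" pair keeps B's verdict
theorem pv_isSubB_append (a e : List Char) :
    isSubB (a ++ pvBr) (e ++ pvBr) = isSubB a e := by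
  simp [isSubB, pv_stripB_append]

-- the step case of A: below one joint "[]" strip, the cascade reduces to the recursion
theorem pv_isSubA_step (a e : List Char) (ha : PySem.Chars.endswith a pvBr = true)
    (he : PySem.Chars.endswith e pvBr = true) :
    isSubA a e = isSubA (PySem.List.slice a none (some (-2))) (PySem.List.slice e none (some (-2))) := by
  rw [isSubA]
  by_cases hae : a = e
  · subst hae
    simp only [beq_self_eq_true, if_true]
    rw [isSubA]
    simp
  · have h1 := pv_special_not_ends a ha
    have h2 := pv_special_not_ends e he
    have h3 := pv_bslit_ne e he
    have h4 := pv_bilit_ne e he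
    simp [hae, h1, h2, h3, h4, ha, he]

-- base case: at least one side has no trailing "[]"
theorem pv_base (a e : List Char)
    (hne : ¬(PySem.Chars.endswith a pvBr = true ∧ PySem.Chars.endswith e pvBr = true)) :
    isSubA a e = isSubB a e := by
  rw [isSubA]
  cases ha : PySem.Chars.endswith a pvBr with
  | false =>
    cases he : PySem.Chars.endswith e pvBr with
    | false =>
      have hsa := pv_stripB_not_ends a ha
      have hse := pv_stripB_not_ends e he
      by_cases hae : a = e
      · simp [isSubB, hse, hae]
      · simp [isSubB, beq_eq_decide, hsa, hse, hae, Bool.or_assoc]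
    | true =>
      have hsa := pv_stripB_not_ends a ha
      have hde := pv_stripB_pos e he
      have hae : ¬ a = e := fun hx => pv_ne_of_ends_left e a he ha hx.symm
      have h2 := pv_special_not_ends e he
      have h3 := pv_bslit_ne e he
      have h4 := pv_bilit_ne e he
      rcases hps : stripB e with ⟨ce, de⟩
      rw [hps] at hde
      simp only at hde
      cases de with
      | zero => omega
      | succ d =>
        simp [isSubB, beq_eq_decide, hsa, hps, hae, h2, h3, h4]
  | true =>
    cases he : PySem.Chars.endswith e pvBr with
    | false =>
      have hse := pv_stripB_not_ends e he
      have hda := pv_stripB_pos a ha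
      have hae : ¬ a = e := pv_ne_of_ends_left a e ha he
      have h1 := pv_special_not_ends a ha
      have h5 := pv_bs_not_mem a ha
      have h6 := pv_bi_not_mem a ha
      rcases hps : stripB a with ⟨ca, da⟩
      rw [hps] at hda
      simp only at hda
      cases da with
      | zero => omega
      | succ d =>
        simp [isSubB, beq_eq_decide, hse, hps, hae, h1, h5, h6]
    | true => exact absurd ⟨ha, he⟩ hne

theorem pv_main : ∀ (n : Nat) (a e : List Char), a.length ≤ n → isSubA a e = isSubB a e := by
  intro n
  induction n with
  | zero =>
    intro a e h
    have ha : PySem.Chars.endswith a pvBr = false := by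
      have : a = [] := List.length_eq_zero_iff.mp (Nat.le_zero.mp h)
      subst this; decide
    exact pv_base a e (by simp [ha])
  | succ n ih =>
    intro a e h
    by_cases hb : PySem.Chars.endswith a pvBr = true ∧ PySem.Chars.endswith e pvBr = true
    · obtain ⟨ha, he⟩ := hb
      have hlt := pv_slice2_len_lt a ha
      rw [pv_isSubA_step a e ha he]
      rw [ih _ _ (by omega)]
      have hB := pv_isSubB_append (PySem.List.slice a none (some (-2))) (PySem.List.slice e none (some (-2)))
      rw [← hB, pv_slice2_spec a ha, pv_slice2_spec e he]
    · exact pv_base a e hb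

-- ===== VERDICT (by name: the statement is the Claim_ definition above) =====
theorem is_subtype_spec : Claim_equal_is_subtype := by
  intro actual expected _
  unfold Spec_is_subtype is_subtype is_subtype_alt
  exact pv_main actual.toList.length actual.toList expected.toList le_rfl
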